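-- pv_equiv track=rewrite | github.com/Darkuss-ai/Diplom | 1kr/basises.py | Pirs
-- ===== SOURCE A (Python) =====
-- def Pirs(Tknf):
--     Tknf = list(Tknf)  # Превартили в список
--     Tknf = [">" if x == "&" or x == "v" else x for x in Tknf]  # Заменили все знаки на стрелочку
--     for i, val in enumerate(Tknf):  # Пробегаемся по символам
--         if val == "n":  # Если встретили н
--             x_save = ''.join(Tknf[i + 1]) + Tknf[i + 2]  # Берём икс и цифру, без н
--             del Tknf[i:i + 2]  # удаляем nxX
--             Tknf[i] = '(' + x_save + " > " + x_save + ')'  # собираем строчку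
--     Tknf = ''.join(Tknf)  # переводим в строку
--     return Tknf  # возвращаем
-- ===== SOURCE B (Python) =====
-- def Pirs(Tknf):
--     s = ['>' if c in '&v' else c for c in Tknf]
--     out = []
--     i = 0
--     n = len(s)
--     while i < n:
--         c = s[i]
--         if c == 'n':
--             tok = s[i + 1] + s[i + 2]
--             out.append('(' + tok + ' > ' + tok + ')')
--             i += 3
--         else:
--             out.append(c)
--             i += 1
--     return ''.join(out)
-- ===== Notes on version B (the rewrite author's own statement) =====
-- stated objective: simpler
-- what changed: A mutates the list in place (del + overwrite) while iterating it with enumerate; B does one read-only index scan over the mapped characters, consuming 3 chars per 'n' token and appending to a fresh output list.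
import Mathlib
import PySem

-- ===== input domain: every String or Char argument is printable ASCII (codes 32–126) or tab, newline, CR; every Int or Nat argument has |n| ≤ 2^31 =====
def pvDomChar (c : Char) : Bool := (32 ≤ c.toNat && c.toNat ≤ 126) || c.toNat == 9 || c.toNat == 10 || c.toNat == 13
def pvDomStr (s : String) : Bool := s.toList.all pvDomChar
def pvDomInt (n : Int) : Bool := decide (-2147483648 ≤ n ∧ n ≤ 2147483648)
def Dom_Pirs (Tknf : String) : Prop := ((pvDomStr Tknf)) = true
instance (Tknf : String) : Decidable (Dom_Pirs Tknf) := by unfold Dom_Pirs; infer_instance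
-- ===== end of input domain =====

-- B replaces A's in-place del/overwrite during enumerate by a single index scan with an output accumulator (simpler).
-- ===== PORT A =====
-- A works on a list of 1-char strings and mutates it in place during the enumerate loop.
-- Python 'for i, val in enumerate(L)' over a mutated list = re-check 'i < len(L)' each step.
-- Out-of-range accesses (where Python raises IndexError) use a default; Pre_ excludes those inputs.
def pirsLoopA (l : List String) (i : Nat) : List String :=
  if _h : i < l.length then
    if l.getD i "" = "n" then                                        -- if val == "n"
      let x_save := (l.getD (i+1) "") ++ (l.getD (i+2) "")           -- ''.join(Tknf[i+1]) + Tknf[i+2]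
      let l' := l.take i ++ l.drop (i+2)                             -- del Tknf[i:i+2]
      pirsLoopA (l'.set i ("(" ++ x_save ++ " > " ++ x_save ++ ")")) -- Tknf[i] = '(' + x_save + " > " + x_save + ')'
        (i+1)
    else
      pirsLoopA l (i+1)
  else l
termination_by l.length + 1 - i
decreasing_by
  · simp only [List.length_set, List.length_append, List.length_take, List.length_drop]; omega
  · omega

def Pirs (Tknf : String) : String :=
  let l := Tknf.toList.map (fun c => String.ofList [c])              -- list(Tknf)
  let l := l.map (fun x => if x = "&" ∨ x = "v" then ">" else x)     -- symbol replacement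
  String.join (pirsLoopA l 0)                                        -- ''.join

-- ===== PORT B =====
def pirsLoopB (s : List Char) (n : Nat) (i : Nat) (out : List String) : List String :=
  if _h : i < n then
    if s.getD i ' ' = 'n' then
      let tok := String.ofList [s.getD (i+1) ' '] ++ String.ofList [s.getD (i+2) ' ']  -- s[i+1] + s[i+2]
      pirsLoopB s n (i+3) (out ++ ["(" ++ tok ++ " > " ++ tok ++ ")"])
    else
      pirsLoopB s n (i+1) (out ++ [String.ofList [s.getD i ' ']])
  else out
termination_by n - i

def Pirs_alt (Tknf : String) : String :=
  let s := Tknf.toList.map (fun c => if c = '&' ∨ c = 'v' then '>' else c)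
  String.join (pirsLoopB s s.length 0 [])

-- ===== PRECONDITION & SPEC =====
-- Pre_ excludes exactly the inputs on which A raises IndexError: an 'n' reached by the
-- left-to-right token scan with fewer than two characters after it.
def pirsGood : List Char → Bool
  | [] => true
  | c :: rest =>
    if c = 'n' then
      match rest with
      | _ :: _ :: r => pirsGood r
      | _ => false
    else pirsGood rest

def Pre_Pirs (Tknf : String) : Prop := pirsGood Tknf.toList = true
instance (Tknf : String) : Decidable (Pre_Pirs Tknf) := by unfold Pre_Pirs; infer_instance
def pvWitness_Pirs : String := "a&nx1v"

def Spec_Pirs (Tknf : String) (out : String) : Prop := out = Pirs_alt Tknf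
instance (Tknf : String) (out : String) : Decidable (Spec_Pirs Tknf out) := by unfold Spec_Pirs; infer_instance

-- ===== CLAIM (what is proved, stated in full; the proofs are below) =====
def Claim_equal_Pirs : Prop := ∀ (Tknf : String), Dom_Pirs Tknf → Pre_Pirs Tknf → Spec_Pirs Tknf (Pirs Tknf)

-- ===== LEMMAS AND PROOFS =====

-- common reference: the chunk decomposition of the (already symbol-mapped) character list
def pirsChunks : List Char → List String
  | [] => []
  | c :: rest =>
    if c = 'n' then
      match rest with
      | a :: b :: r =>
        ("(" ++ (String.ofList [a] ++ String.ofList [b]) ++ " > " ++ (String.ofList [a] ++ String.ofList [b]) ++ ")") :: pirsChunks r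
      | _ => []      -- unreachable under pirsGood
    else String.ofList [c] :: pirsChunks rest

theorem pirsGood_cons (c : Char) (rest : List Char) (hc : c ≠ 'n') :
    pirsGood (c :: rest) = pirsGood rest := by
  rw [pirsGood.eq_def]; simp [hc]
theorem pirsGood_n3 (a b : Char) (r : List Char) : pirsGood ('n'::a::b::r) = pirsGood r := by
  rw [pirsGood.eq_def]; simp
theorem pirsGood_n1 : pirsGood ['n'] = false := by rw [pirsGood.eq_def]; simp
theorem pirsGood_n2 (a : Char) : pirsGood ['n', a] = false := by rw [pirsGood.eq_def]; simp
theorem pirsChunks_cons (c : Char) (rest : List Char) (hc : c ≠ 'n') :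
    pirsChunks (c :: rest) = String.ofList [c] :: pirsChunks rest := by
  rw [pirsChunks.eq_def]; simp [hc]
theorem pirsChunks_n3 (a b : Char) (r : List Char) :
    pirsChunks ('n'::a::b::r) =
      ("(" ++ (String.ofList [a] ++ String.ofList [b]) ++ " > " ++ (String.ofList [a] ++ String.ofList [b]) ++ ")") :: pirsChunks r := by
  rw [pirsChunks.eq_def]; simp

theorem pirsGood_map (f : Char → Char) (h : ∀ c, f c = 'n' ↔ c = 'n')
    (cs : List Char) : pirsGood (cs.map f) = pirsGood cs := by
  generalize hm : cs.length = m
  induction m using Nat.strong_induction_on generalizing cs with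
  | _ m ih =>
  match cs with
  | [] => simp
  | c :: rest =>
    by_cases hc : c = 'n'
    · subst hc
      have hfn : f 'n' = 'n' := (h 'n').mpr rfl
      match rest with
      | [] => simp [hfn, pirsGood_n1]
      | [a] =>
        by_cases hfa : f a = 'n'
        · simp [hfn, hfa, pirsGood_n2]
        · simp [hfn, pirsGood_n2]
      | a :: b :: r =>
        have := ih r.length (by simp at hm; omega) r rfl
        simp only [List.map, hfn, pirsGood_n3, this]
    · have hf : f c ≠ 'n' := fun hf => hc ((h c).mp hf)
      have := ih rest.length (by simp at hm; omega) rest rfl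
      simp only [List.map, pirsGood_cons _ _ hf, pirsGood_cons _ _ hc, this]

theorem pirsLoopA_eq (cs : List Char) (pre : List String)
    (hg : pirsGood cs = true) :
    pirsLoopA (pre ++ cs.map (fun c => String.ofList [c])) pre.length = pre ++ pirsChunks cs := by
  generalize hm : cs.length = m
  induction m using Nat.strong_induction_on generalizing cs pre with
  | _ m ih =>
  match cs with
  | [] =>
    rw [pirsLoopA]
    simp [pirsChunks]
  | c :: rest =>
    rw [pirsLoopA]
    have hlen : pre.length < (pre ++ (c::rest).map (fun c => String.ofList [c])).length := by simp
    have hget : (pre ++ (c::rest).map (fun c => String.ofList [c])).getD pre.length "" = String.ofList [c] := by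
      simp [List.getD]
    by_cases hc : c = 'n'
    · subst hc
      match rest with
      | [] => rw [pirsGood_n1] at hg; exact absurd hg (by simp)
      | [a] => rw [pirsGood_n2] at hg; exact absurd hg (by simp)
      | a :: b :: r =>
        have hg' : pirsGood r = true := by rwa [pirsGood_n3] at hg
        have h1 : (pre ++ ('n'::a::b::r).map (fun c => String.ofList [c])).getD (pre.length + 1) "" = String.ofList [a] := by
          simp [List.getD]
        have h2 : (pre ++ ('n'::a::b::r).map (fun c => String.ofList [c])).getD (pre.length + 2) "" = String.ofList [b] := by
          simp [List.getD]
        have htake : (pre ++ ('n'::a::b::r).map (fun c => String.ofList [c])).take pre.length = pre := by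
          simp
        have hdrop : (pre ++ ('n'::a::b::r).map (fun c => String.ofList [c])).drop (pre.length + 2) =
            String.ofList [b] :: r.map (fun c => String.ofList [c]) := by
          rw [show pre.length + 2 = (pre ++ [String.ofList ['n'], String.ofList [a]]).length by simp]
          rw [show pre ++ ('n'::a::b::r).map (fun c => String.ofList [c]) = (pre ++ [String.ofList ['n'], String.ofList [a]]) ++ (String.ofList [b] :: r.map (fun c => String.ofList [c])) by simp]
          rw [List.drop_left]
        simp only [dif_pos hlen, hget, h1, h2, htake, hdrop, if_true]
        set tok := "(" ++ (String.ofList [a] ++ String.ofList [b]) ++ " > " ++ (String.ofList [a] ++ String.ofList [b]) ++ ")" with htok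
        have hset : (pre ++ String.ofList [b] :: r.map (fun c => String.ofList [c])).set pre.length tok =
            (pre ++ [tok]) ++ r.map (fun c => String.ofList [c]) := by
          rw [List.set_append_right _ _ (le_refl _)]
          simp
        rw [hset]
        have hlen2 : pre.length + 1 = (pre ++ [tok]).length := by simp
        rw [hlen2, ih r.length (by simp at hm; omega) r (pre ++ [tok]) hg' rfl]
        rw [pirsChunks_n3]
        simp [htok]
    · have hcn : ¬(String.ofList [c] = "n") := by
        intro h; apply hc
        have := congrArg String.toList h
        simpa using this
      simp only [dif_pos hlen, hget, if_neg hcn]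
      have hg' : pirsGood rest = true := by rwa [pirsGood_cons c rest hc] at hg
      have hlist : pre ++ (c::rest).map (fun c => String.ofList [c]) =
          (pre ++ [String.ofList [c]]) ++ rest.map (fun c => String.ofList [c]) := by simp
      have hlen2 : pre.length + 1 = (pre ++ [String.ofList [c]]).length := by simp
      rw [hlist, hlen2, ih rest.length (by simp at hm; omega) rest (pre ++ [String.ofList [c]]) hg' rfl]
      rw [pirsChunks_cons c rest hc]
      simp

theorem pirsLoopB_eq (s : List Char) (i : Nat) (out : List String)
    (hg : pirsGood (s.drop i) = true) :
    pirsLoopB s s.length i out = out ++ pirsChunks (s.drop i) := by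
  generalize hm : s.length - i = m
  induction m using Nat.strong_induction_on generalizing i out with
  | _ m ih =>
  rw [pirsLoopB]
  by_cases h : i < s.length
  · have hdropi : s.drop i = s[i] :: s.drop (i+1) := List.drop_eq_getElem_cons h
    have hget : s.getD i ' ' = s[i] := by
      simp [List.getD_eq_getElem?_getD, List.getElem?_eq_getElem h]
    by_cases hn : s[i] = 'n'
    · by_cases h2 : i + 2 < s.length
      · have h1 : i + 1 < s.length := by omega
        have hdrop1 : s.drop (i+1) = s[i+1] :: s.drop (i+2) := List.drop_eq_getElem_cons h1
        have hdrop2 : s.drop (i+2) = s[i+2] :: s.drop (i+3) := List.drop_eq_getElem_cons h2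
        have hg' : pirsGood (s.drop (i+3)) = true := by
          rw [hdropi, hn, hdrop1, hdrop2, pirsGood_n3] at hg
          exact hg
        have hg1 : s.getD (i+1) ' ' = s[i+1] := by
          simp [List.getD_eq_getElem?_getD, List.getElem?_eq_getElem h1]
        have hg2 : s.getD (i+2) ' ' = s[i+2] := by
          simp [List.getD_eq_getElem?_getD, List.getElem?_eq_getElem h2]
        simp only [dif_pos h, hget, hg1, hg2, hn, if_pos]
        rw [ih (s.length - (i+3)) (by omega) (i+3) _ hg' rfl]
        rw [hdropi, hn, hdrop1, hdrop2, pirsChunks_n3]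
        simp
      · exfalso
        rw [hdropi, hn] at hg
        have hlen : (s.drop (i+1)).length ≤ 1 := by simp; omega
        match ht : s.drop (i+1), hlen with
        | [], _ => rw [ht, pirsGood_n1] at hg; simp at hg
        | [a], _ => rw [ht, pirsGood_n2] at hg; simp at hg
        | a :: b :: r, hlen => simp at hlen
    · have hg' : pirsGood (s.drop (i+1)) = true := by
        rw [hdropi, pirsGood_cons _ _ hn] at hg
        exact hg
      simp only [dif_pos h, hget, if_neg hn]
      rw [ih (s.length - (i+1)) (by omega) (i+1) _ hg' rfl]
      rw [hdropi, pirsChunks_cons _ _ hn]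
      simp
  · rw [dif_neg h]
    have : s.drop i = [] := List.drop_eq_nil_of_le (le_of_not_gt h)
    simp [this, pirsChunks]

theorem pirs_map_eq (cs : List Char) :
    (cs.map (fun c => String.ofList [c])).map (fun x => if x = "&" ∨ x = "v" then ">" else x) =
    (cs.map (fun c => if c = '&' ∨ c = 'v' then '>' else c)).map (fun c => String.ofList [c]) := by
  simp only [List.map_map]
  apply List.map_congr_left
  intro c _
  by_cases h1 : c = '&'
  · subst h1; simp
  · by_cases h2 : c = 'v'
    · subst h2; simp
    · have e1 : String.ofList [c] ≠ "&" := by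
        intro h; apply h1; have := congrArg String.toList h; simpa using this
      have e2 : String.ofList [c] ≠ "v" := by
        intro h; apply h2; have := congrArg String.toList h; simpa using this
      simp [h1, h2, e1, e2]

-- ===== VERDICT (by name: the statement is the Claim_ definition above) =====
theorem Pirs_spec : Claim_equal_Pirs := by
  intro Tknf _ hpre
  unfold Spec_Pirs Pirs Pirs_alt
  set cs := Tknf.toList with hcs
  set g : Char → Char := fun c => if c = '&' ∨ c = 'v' then '>' else c with hgdef
  have hmap : (cs.map (fun c => String.ofList [c])).map (fun x => if x = "&" ∨ x = "v" then ">" else x) =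
      (cs.map g).map (fun c => String.ofList [c]) := pirs_map_eq cs
  have hgood : pirsGood (cs.map g) = true := by
    rw [pirsGood_map g ?_ cs]
    · exact hpre
    · intro c
      by_cases h1 : c = '&'
      · subst h1; simp [hgdef]
      · by_cases h2 : c = 'v'
        · subst h2; simp [hgdef]
        · simp [hgdef, h1, h2]
  have hA := pirsLoopA_eq (cs.map g) [] hgood
  simp only [List.nil_append, List.length_nil] at hA
  have hB := pirsLoopB_eq (cs.map g) 0 [] (by simpa using hgood)
  simp only [List.nil_append, List.drop_zero] at hB
  simp only [hmap, hA, hB]
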